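-- pv_equiv track=rewrite | github.com/Akintoba21/LeetCode | sentence-similarity-iii.py | areSentencesSimilar
-- ===== SOURCE A (Python) =====
-- def areSentencesSimilar(sentence1: str, sentence2: str) -> bool:
--     sentence1 = sentence1.split(' ')
--     sentence2 = sentence2.split(' ')
--     gcsl = 0
--     gcsr = 0
--     l = min(len(sentence1), len(sentence2))
--     for x in range(l):
--         if sentence1[x] != sentence2[x]: break
--         gcsl += 1
--     for x in range(l):
--         if sentence1[-(x+1)] != sentence2[-(x+1)]: break
--         gcsr += 1
--     return gcsl + gcsr >= l
-- ===== SOURCE B (Python) =====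
-- def areSentencesSimilar(sentence1: str, sentence2: str) -> bool:
--     a = sentence1.split(' ')
--     b = sentence2.split(' ')
--     while a and b and a[0] == b[0]:
--         a.pop(0)
--         b.pop(0)
--     while a and b and a[-1] == b[-1]:
--         a.pop()
--         b.pop()
--     return not a or not b
-- ===== Notes on version B (the rewrite author's own statement) =====
-- stated objective: alternative
-- what changed: Replaces the two independent index-counting passes plus the gcsl+gcsr >= min-length arithmetic test by a single converging two-pointer consumption: pop matching words from the front, then from the back of what remains, and decide by emptiness.
import Mathlib
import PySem

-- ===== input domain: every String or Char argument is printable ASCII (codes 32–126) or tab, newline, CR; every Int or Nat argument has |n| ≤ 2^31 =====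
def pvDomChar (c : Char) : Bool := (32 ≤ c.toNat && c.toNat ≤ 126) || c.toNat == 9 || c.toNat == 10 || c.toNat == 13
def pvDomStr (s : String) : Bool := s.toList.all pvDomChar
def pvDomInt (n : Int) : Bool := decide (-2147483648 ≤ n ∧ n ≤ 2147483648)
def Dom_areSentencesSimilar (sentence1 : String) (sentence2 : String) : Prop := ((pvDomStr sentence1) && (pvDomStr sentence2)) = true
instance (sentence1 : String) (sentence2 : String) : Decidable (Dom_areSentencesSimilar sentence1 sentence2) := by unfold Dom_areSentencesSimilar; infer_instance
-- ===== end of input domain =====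

-- B replaces A's two independent counting passes and min-length arithmetic by a single
-- converging front-then-back consumption that decides by emptiness (alternative decomposition).


-- ===== PORT A =====
-- first for-loop of A: 'for x in range(l): if s1[x] != s2[x]: break; gcsl += 1'
def loopL (a b : List String) (l : Nat) (x : Nat) (gcs : Nat) : Nat :=
  if _h : x < l then
    if PySem.List.pyGet? a (x : Int) ≠ PySem.List.pyGet? b (x : Int) then gcs
    else loopL a b l (x + 1) (gcs + 1)
  else gcs
termination_by l - x

-- second for-loop of A: 'for x in range(l): if s1[-(x+1)] != s2[-(x+1)]: break; gcsr += 1'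
def loopR (a b : List String) (l : Nat) (x : Nat) (gcs : Nat) : Nat :=
  if _h : x < l then
    if PySem.List.pyGet? a (-((x : Int) + 1)) ≠ PySem.List.pyGet? b (-((x : Int) + 1)) then gcs
    else loopR a b l (x + 1) (gcs + 1)
  else gcs
termination_by l - x

def areSentencesSimilar (sentence1 : String) (sentence2 : String) : Bool :=
  let s1 := (PySem.Str.split? sentence1 " ").getD []
  let s2 := (PySem.Str.split? sentence2 " ").getD []
  let l := min s1.length s2.length
  let gcsl := loopL s1 s2 l 0 0
  let gcsr := loopR s1 s2 l 0 0
  decide (gcsl + gcsr ≥ l)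

-- ===== PORT B =====
-- 'while a and b and a[0] == b[0]: a.pop(0); b.pop(0)'
def frontLoop : List String → List String → List String × List String
  | x :: a, y :: b => if x = y then frontLoop a b else (x :: a, y :: b)
  | a, b => (a, b)

-- 'while a and b and a[-1] == b[-1]: a.pop(); b.pop()'
def backLoop (a b : List String) : List String × List String :=
  if h : a ≠ [] ∧ b ≠ [] ∧ PySem.List.pyGet? a (-1) = PySem.List.pyGet? b (-1) then
    backLoop a.dropLast b.dropLast
  else (a, b)
termination_by a.length
decreasing_by
  have : a ≠ [] := h.1
  have : 0 < a.length := List.length_pos_of_ne_nil this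
  simp [List.length_dropLast]; omega

def areSentencesSimilar_alt (sentence1 : String) (sentence2 : String) : Bool :=
  let a := (PySem.Str.split? sentence1 " ").getD []
  let b := (PySem.Str.split? sentence2 " ").getD []
  let p := frontLoop a b
  let q := backLoop p.1 p.2
  q.1.isEmpty || q.2.isEmpty

-- ===== PRECONDITION & SPEC =====
def Spec_areSentencesSimilar (sentence1 : String) (sentence2 : String) (out : Bool) : Prop := out = areSentencesSimilar_alt sentence1 sentence2
instance (sentence1 : String) (sentence2 : String) (out : Bool) : Decidable (Spec_areSentencesSimilar sentence1 sentence2 out) := by unfold Spec_areSentencesSimilar; infer_instance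

-- ===== CLAIM (what is proved, stated in full; the proofs are below) =====
def Claim_equal_areSentencesSimilar : Prop := ∀ (sentence1 : String) (sentence2 : String), Dom_areSentencesSimilar sentence1 sentence2 → Spec_areSentencesSimilar sentence1 sentence2 (areSentencesSimilar sentence1 sentence2)

-- ===== LEMMAS AND PROOFS =====

-- length of the longest common prefix of two word lists
def pref : List String → List String → Nat
  | x :: a, y :: b => if x = y then pref a b + 1 else 0
  | _, _ => 0

theorem pref_le : ∀ (a b : List String), pref a b ≤ min a.length b.length := by
  intro a
  induction a with
  | nil => intro b; simp [pref]
  | cons x a ih =>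
    intro b
    cases b with
    | nil => simp [pref]
    | cons y b =>
      by_cases h : x = y <;> simp [pref, h]
      have := ih b; omega

theorem loopL_eq (a b : List String) :
    ∀ fuel x gcs, x + fuel = min a.length b.length →
      loopL a b (min a.length b.length) x gcs = gcs + pref (a.drop x) (b.drop x) := by
  intro fuel
  induction fuel with
  | zero =>
    intro x gcs h
    unfold loopL
    have hx : ¬ x < min a.length b.length := by omega
    simp only [hx, dite_false]
    have : a.drop x = [] ∨ b.drop x = [] := by
      rcases le_total a.length b.length with h1 | h1
      · left; apply List.drop_eq_nil_of_le; omega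
      · right; apply List.drop_eq_nil_of_le; omega
    rcases this with h1 | h1 <;> rw [h1]
    · simp [pref]
    · cases a.drop x <;> simp [pref]
  | succ n ih =>
    intro x gcs h
    have hx : x < min a.length b.length := by omega
    have hxa : x < a.length := by omega
    have hxb : x < b.length := by omega
    unfold loopL
    simp only [hx, dite_true]
    rw [List.drop_eq_getElem_cons hxa, List.drop_eq_getElem_cons hxb]
    rw [PySem.List.pyGet?_natCast, PySem.List.pyGet?_natCast,
        List.getElem?_eq_getElem hxa, List.getElem?_eq_getElem hxb]
    by_cases he : a[x] = b[x]
    · rw [if_neg (by simp [he]), ih (x + 1) (gcs + 1) (by omega)]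
      simp [pref, he]
      omega
    · rw [if_pos (by simp [he])]
      simp [pref, he]

theorem loopR_eq (a b : List String) :
    ∀ fuel x gcs, x + fuel = min a.length b.length →
      loopR a b (min a.length b.length) x gcs = gcs + pref (a.reverse.drop x) (b.reverse.drop x) := by
  intro fuel
  induction fuel with
  | zero =>
    intro x gcs h
    unfold loopR
    have hx : ¬ x < min a.length b.length := by omega
    simp only [hx, dite_false]
    have : a.reverse.drop x = [] ∨ b.reverse.drop x = [] := by
      rcases le_total a.length b.length with h1 | h1
      · left; apply List.drop_eq_nil_of_le; simp; omega
      · right; apply List.drop_eq_nil_of_le; simp; omega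
    rcases this with h1 | h1 <;> rw [h1]
    · simp [pref]
    · cases a.reverse.drop x <;> simp [pref]
  | succ n ih =>
    intro x gcs h
    have hx : x < min a.length b.length := by omega
    have hxa : x < a.length := by omega
    have hxb : x < b.length := by omega
    have hxa' : x < a.reverse.length := by simp; omega
    have hxb' : x < b.reverse.length := by simp; omega
    unfold loopR
    simp only [hx, dite_true]
    have ca : (-((x : Int) + 1)) = (-(((x + 1 : Nat)) : Int)) := by push_cast; ring
    rw [ca, PySem.List.pyGet?_neg_natCast a (x + 1) (by omega) (by omega),
        PySem.List.pyGet?_neg_natCast b (x + 1) (by omega) (by omega)]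
    have ra : a[a.length - (x + 1)]? = a.reverse[x]? := by
      rw [List.getElem?_reverse hxa]
      congr 1
      omega
    have rb : b[b.length - (x + 1)]? = b.reverse[x]? := by
      rw [List.getElem?_reverse hxb]
      congr 1
      omega
    rw [ra, rb, List.getElem?_eq_getElem hxa', List.getElem?_eq_getElem hxb']
    rw [List.drop_eq_getElem_cons hxa', List.drop_eq_getElem_cons hxb']
    by_cases he : a.reverse[x] = b.reverse[x]
    · have hs : (some a.reverse[x] : Option String) = some b.reverse[x] := by rw [he]
      rw [if_neg (not_not_intro hs), ih (x + 1) (gcs + 1) (by omega)]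
      simp only [pref]
      rw [if_pos he]
      omega
    · have hs : (some a.reverse[x] : Option String) ≠ some b.reverse[x] :=
        fun hcon => he (Option.some.inj hcon)
      rw [if_pos hs]
      simp only [pref]
      rw [if_neg he]
      omega

theorem frontLoop_eq : ∀ (a b : List String),
    frontLoop a b = (a.drop (pref a b), b.drop (pref a b)) := by
  intro a
  induction a with
  | nil => intro b; cases b <;> simp [frontLoop, pref]
  | cons x a ih =>
    intro b
    cases b with
    | nil => simp [frontLoop, pref]
    | cons y b =>
      by_cases h : x = y <;> simp [frontLoop, pref, h, ih]

theorem backLoop_eq : ∀ (ra rb : List String),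
    backLoop ra.reverse rb.reverse = ((frontLoop ra rb).1.reverse, (frontLoop ra rb).2.reverse) := by
  intro ra
  induction ra with
  | nil =>
    intro rb
    rw [backLoop]
    simp [frontLoop]
  | cons x ra ih =>
    intro rb
    cases rb with
    | nil =>
      rw [backLoop]
      simp [frontLoop]
    | cons y rb =>
      rw [backLoop]
      have hga : PySem.List.pyGet? (x :: ra).reverse (-1) = some x := by
        simp [PySem.List.pyGet?_neg_one]
      have hgb : PySem.List.pyGet? (y :: rb).reverse (-1) = some y := by
        simp [PySem.List.pyGet?_neg_one]
      by_cases h : x = y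
      · have hc : (x :: ra).reverse ≠ [] ∧ (y :: rb).reverse ≠ [] ∧
            PySem.List.pyGet? ((x :: ra).reverse) (-1) = PySem.List.pyGet? ((y :: rb).reverse) (-1) := by
          refine ⟨by simp, by simp, ?_⟩
          rw [hga, hgb, h]
        have da : ((x :: ra).reverse).dropLast = ra.reverse := by
          simp [List.reverse_cons]
        have db : ((y :: rb).reverse).dropLast = rb.reverse := by
          simp [List.reverse_cons]
        have hf : frontLoop (x :: ra) (y :: rb) = frontLoop ra rb := by
          simp [frontLoop, h]
        rw [hf, dif_pos hc, da, db, ih rb]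
      · have hc : ¬ ((x :: ra).reverse ≠ [] ∧ (y :: rb).reverse ≠ [] ∧
            PySem.List.pyGet? ((x :: ra).reverse) (-1) = PySem.List.pyGet? ((y :: rb).reverse) (-1)) := by
          rw [hga, hgb]
          simp [h]
        have hf : frontLoop (x :: ra) (y :: rb) = (x :: ra, y :: rb) := by
          simp [frontLoop, h]
        rw [hf, dif_neg hc]

theorem pref_take : ∀ (a b : List String) (m n : Nat),
    pref (a.take m) (b.take n) = min (pref a b) (min m n) := by
  intro a
  induction a with
  | nil => intro b m n; simp [pref]
  | cons x a ih =>
    intro b m n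
    cases b with
    | nil => cases m <;> simp [pref]
    | cons y b =>
      cases m with
      | zero => simp [pref]
      | succ m =>
        cases n with
        | zero =>
          simp only [List.take_succ_cons, List.take_zero]
          cases a.take m <;> simp [pref]
        | succ n =>
          by_cases h : x = y
          · simp [pref, h, ih]
          · simp [pref, h]

theorem main_lists (a b : List String) :
    (decide (loopL a b (min a.length b.length) 0 0 + loopR a b (min a.length b.length) 0 0 ≥ min a.length b.length)) =
      (((backLoop (frontLoop a b).1 (frontLoop a b).2).1.isEmpty ||
        (backLoop (frontLoop a b).1 (frontLoop a b).2).2.isEmpty)) := by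
  have hl := loopL_eq a b (min a.length b.length) 0 0 (by omega)
  have hr := loopR_eq a b (min a.length b.length) 0 0 (by omega)
  simp only [List.drop_zero] at hl hr
  set P := pref a b with hP
  set S := pref a.reverse b.reverse with hS
  have hPle := pref_le a b
  have hSle := pref_le a.reverse b.reverse
  simp only [List.length_reverse] at hSle
  rw [hl, hr]
  rw [frontLoop_eq a b]
  have e1 : backLoop (a.drop P) (b.drop P) =
      ((frontLoop (a.drop P).reverse (b.drop P).reverse).1.reverse,
       (frontLoop (a.drop P).reverse (b.drop P).reverse).2.reverse) := by
    have := backLoop_eq (a.drop P).reverse (b.drop P).reverse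
    simpa using this
  rw [e1, frontLoop_eq]
  set S' := pref (a.drop P).reverse (b.drop P).reverse with hS'
  have hS'v : S' = min S (min (a.length - P) (b.length - P)) := by
    rw [hS', List.reverse_drop, List.reverse_drop, pref_take]
  have hS'le : S' ≤ min ((a.drop P).reverse.length) ((b.drop P).reverse.length) :=
    pref_le _ _
  simp only [List.length_reverse, List.length_drop] at hS'le
  have key : (min a.length b.length ≤ P + S) ↔
      (((a.drop P).reverse.drop S' = []) ∨ ((b.drop P).reverse.drop S' = [])) := by
    rw [List.drop_eq_nil_iff, List.drop_eq_nil_iff]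
    simp only [List.length_reverse, List.length_drop]
    omega
  by_cases hc : min a.length b.length ≤ P + S
  · rcases key.mp hc with h1 | h1 <;> simp [hc, h1]
  · have hA : (a.drop P).reverse.drop S' ≠ [] := fun h => hc (key.mpr (Or.inl h))
    have hB : (b.drop P).reverse.drop S' ≠ [] := fun h => hc (key.mpr (Or.inr h))
    simp [hc, hA, hB]

-- ===== VERDICT (by name: the statement is the Claim_ definition above) =====
theorem areSentencesSimilar_spec : Claim_equal_areSentencesSimilar := by
  intro s1 s2 _
  unfold Spec_areSentencesSimilar areSentencesSimilar areSentencesSimilar_alt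
  exact main_lists ((PySem.Str.split? s1 " ").getD []) ((PySem.Str.split? s2 " ").getD [])
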